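-- pv_equiv track=rewrite | github.com/ssupecial/ps | programmers/lv2/석유 시추.py | solution
-- ===== SOURCE A (Python) =====
-- from collections import deque
--
-- def solution(land):
--     n = len(land)
--     m = len(land[0])
--
--     visited = [[False] * m for _ in range(n)]
--     oil = [[0] * m for _ in range(n)]
--
--     dx = [1, 0, -1, 0]
--     dy = [0, -1, 0, 1]
--
--     answers = [0] * m
--
--     for i in range(n):
--         for j in range(m):
--             if not visited[i][j] and land[i][j] == 1:
--                 arr = []
--                 q = deque()
--                 q.append([i, j])
--                 visited[i][j] = True
--
--                 while q:
--                     x, y = q.pop()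
--                     arr.append(y)
--                     for k in range(4):
--                         cur_x = x + dx[k]
--                         cur_y = y + dy[k]
--
--                         if cur_x < 0 or cur_x >= n or cur_y < 0 or cur_y >= m:
--                             continue
--                         if visited[cur_x][cur_y] or land[cur_x][cur_y] == 0:
--                             continue
--
--                         q.append([cur_x, cur_y])
--                         visited[cur_x][cur_y] = True
--
--                 size = len(arr)
--                 if size > 0:
--                     for y in set(arr):
--                         answers[y] += size
--
--     answer = max(answers)
--
--     return answer
-- ===== SOURCE B (Python) =====
-- def solution(land):
--     n, m = len(land), len(land[0])
--     seen = set()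
--     answers = [0] * m
--     for i in range(n):
--         for j in range(m):
--             if land[i][j] == 1 and (i, j) not in seen:
--                 # grow the whole component by set-based frontier expansion
--                 comp = {(i, j)}
--                 frontier = comp
--                 while frontier:
--                     frontier = {(x + dx, y + dy)
--                                 for (x, y) in frontier
--                                 for (dx, dy) in ((1, 0), (-1, 0), (0, 1), (0, -1))
--                                 if 0 <= x + dx < n and 0 <= y + dy < m
--                                 and land[x + dx][y + dy] != 0} - comp
--                     comp |= frontier
--                 seen |= comp
--                 size = len(comp)
--                 for y in {c for (_, c) in comp}:
--                     answers[y] += size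
--     return max(answers)
-- ===== Notes on version B (the rewrite author's own statement) =====
-- stated objective: alternative
-- what changed: Replaced the per-cell deque-stack DFS with an n*m boolean visited matrix and a column list with multiplicities by whole-frontier set expansion: each component is grown layer by layer with set comprehensions (comp/frontier/seen sets), and sizes/columns are read off the component set directly.
-- outside the precondition, e.g. on solution([]): A raises IndexError, B raises IndexError
import Mathlib
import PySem

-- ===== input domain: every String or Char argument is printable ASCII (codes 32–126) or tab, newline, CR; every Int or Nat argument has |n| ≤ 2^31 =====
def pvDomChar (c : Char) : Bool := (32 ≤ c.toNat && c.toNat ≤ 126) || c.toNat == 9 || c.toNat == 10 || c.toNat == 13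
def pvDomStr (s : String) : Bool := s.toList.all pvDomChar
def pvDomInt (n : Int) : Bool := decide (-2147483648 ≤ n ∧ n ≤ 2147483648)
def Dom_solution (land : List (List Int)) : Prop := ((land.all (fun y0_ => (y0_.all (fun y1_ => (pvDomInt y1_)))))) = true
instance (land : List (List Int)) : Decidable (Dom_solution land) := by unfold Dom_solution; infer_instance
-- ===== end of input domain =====

-- B replaces A's per-cell deque-stack DFS over a boolean visited matrix by set-based
-- whole-frontier expansion (objective: alternative, same asymptotic cost).

-- ===== PORT A =====
-- land[x][y]; every use in both ports is guarded by 0 ≤ x < n ∧ 0 ≤ y < m and Pre_ gives each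
-- row length ≥ m = len(land[0]), so the defaults are never read (exact there).
def cellAt (land : List (List Int)) (x y : Int) : Int :=
  PySem.List.pyGetD (PySem.List.pyGetD land x []) y 0

-- answers[y] += s  (0 ≤ y < len answers at every use site)
def bump (answers : List Int) (y s : Int) : List Int :=
  PySem.List.pySetD answers y (PySem.List.pyGetD answers y 0 + s)

-- the nested "for i in range(n): for j in range(m):" scan, as the list of visited pairs
def pvCells (n m : Int) : List (Int × Int) :=
  (PySem.List.pyRange 0 n 1).flatMap (fun i => (PySem.List.pyRange 0 m 1).map (fun j => (i, j)))

-- body of A's "for k in range(4)" neighbour loop: dx/dy zipped into one pair d;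
-- Python's visited boolean matrix is represented by the list of its True cells (exact).
def dfsStep (land : List (List Int)) (n m x y : Int)
    (st : List (Int × Int) × List (Int × Int)) (d : Int × Int) :
    List (Int × Int) × List (Int × Int) :=
  let cx := x + d.1
  let cy := y + d.2
  if cx < 0 ∨ n ≤ cx ∨ cy < 0 ∨ m ≤ cy then st
  else if (cx, cy) ∈ st.2 ∨ cellAt land cx cy = 0 then st
  else ((cx, cy) :: st.1, (cx, cy) :: st.2)

-- A's "while q:" loop; q.append/q.pop work at the same end, modelled by cons/head (exact).
-- fuel only makes the recursion structural; it is n*m+1 at the call and never runs out there.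
def dfsLoop (land : List (List Int)) (n m : Int) :
    Nat → List (Int × Int) → List (Int × Int) → List Int → List Int × List (Int × Int)
  | 0, _, visited, arr => (arr, visited)
  | _ + 1, [], visited, arr => (arr, visited)
  | fuel + 1, (x, y) :: rest, visited, arr =>
    let p := [((1:Int), (0:Int)), (0, -1), (-1, 0), (0, 1)].foldl
        (dfsStep land n m x y) (rest, visited)
    dfsLoop land n m fuel p.1 p.2 (arr ++ [y])

-- body of A's scan: one seed; "for y in set(arr): answers[y] += size"
def solOuterA (land : List (List Int)) (n m : Int)
    (st : List (Int × Int) × List Int) (ij : Int × Int) : List (Int × Int) × List Int :=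
  if ij ∉ st.1 ∧ cellAt land ij.1 ij.2 = 1 then
    let r := dfsLoop land n m (n.toNat * m.toNat + 1) [ij] (ij :: st.1) []
    let size : Int := r.1.length
    if size > 0 then
      (r.2, (PySem.Set.ofList r.1).foldl (fun a y => bump a y size) st.2)
    else (r.2, st.2)
  else st

-- A's unused "oil" matrix is dead code and omitted.
def solution (land : List (List Int)) : Int :=
  let n : Int := land.length
  let m : Int := (PySem.List.pyGetD land 0 []).length
  let final := (pvCells n m).foldl (solOuterA land n m) ([], List.replicate m.toNat 0)
  (PySem.List.max? final.2 (fun v => v)).getD 0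

-- ===== PORT B =====
-- the frontier set comprehension of Source B (targets in bounds and nonzero, minus comp is applied by the caller)
def frontierNbrs (land : List (List Int)) (n m : Int) (frontier : List (Int × Int)) :
    List (Int × Int) :=
  frontier.flatMap (fun c =>
    [((1:Int), (0:Int)), (-1, 0), (0, 1), (0, -1)].filterMap (fun d =>
      let cx := c.1 + d.1
      let cy := c.2 + d.2
      if 0 ≤ cx ∧ cx < n ∧ 0 ≤ cy ∧ cy < m ∧ cellAt land cx cy ≠ 0 then some (cx, cy)
      else none))

-- Source B's "while frontier:" loop; fuel only makes it structural (n*m+2 at the call, never exhausted).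
def growLoop (land : List (List Int)) (n m : Int) :
    Nat → PySem.Set (Int × Int) → PySem.Set (Int × Int) → PySem.Set (Int × Int)
  | 0, comp, _ => comp
  | fuel + 1, comp, frontier =>
    if frontier = [] then comp
    else
      let f' := PySem.Set.diff (PySem.Set.ofList (frontierNbrs land n m frontier)) comp
      growLoop land n m fuel (PySem.Set.update comp f') f'

def solOuterB (land : List (List Int)) (n m : Int)
    (st : PySem.Set (Int × Int) × List Int) (ij : Int × Int) : PySem.Set (Int × Int) × List Int :=
  if cellAt land ij.1 ij.2 = 1 ∧ ij ∉ st.1 then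
    let comp := growLoop land n m (n.toNat * m.toNat + 2) [ij] [ij]
    let size : Int := comp.length
    let cols := PySem.Set.ofList (comp.map (fun c => c.2))
    (PySem.Set.update st.1 comp, cols.foldl (fun a y => bump a y size) st.2)
  else st

def solution_alt (land : List (List Int)) : Int :=
  let n : Int := land.length
  let m : Int := (PySem.List.pyGetD land 0 []).length
  let final := (pvCells n m).foldl (solOuterB land n m) ([], List.replicate m.toNat 0)
  (PySem.List.max? final.2 (fun v => v)).getD 0

-- ===== PRECONDITION & SPEC =====
-- Both ports are total and proved equal on every input; Pre_ only marks where the PYTHON A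
-- raises (B raises on the same inputs): the empty grid (land[0] IndexError),
-- a zero-width first row (max() of [] ValueError), and grids with a row shorter than the
-- first row (IndexError while reading land[x][y] for y < len(land[0])).
def Pre_solution (land : List (List Int)) : Prop :=
  land ≠ [] ∧ 0 < (land.headI).length ∧ ∀ row ∈ land, (land.headI).length ≤ row.length
instance (land : List (List Int)) : Decidable (Pre_solution land) := by
  unfold Pre_solution; infer_instance

def pvWitness_solution : List (List Int) := [[1, 0], [1, 1]]

def Spec_solution (land : List (List Int)) (out : Int) : Prop := out = solution_alt land
instance (land : List (List Int)) (out : Int) : Decidable (Spec_solution land out) := by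
  unfold Spec_solution; infer_instance

-- ===== CLAIM (what is proved, stated in full; the proofs are below) =====
def Claim_equal_solution : Prop :=
  ∀ (land : List (List Int)), Dom_solution land → Pre_solution land →
    Spec_solution land (solution land)

-- ===== LEMMAS AND PROOFS =====


-- cell vocabulary: in-bounds nonzero cells, grid adjacency, connectivity
def pvNZ (land : List (List Int)) (n m : Int) (c : Int × Int) : Prop :=
  0 ≤ c.1 ∧ c.1 < n ∧ 0 ≤ c.2 ∧ c.2 < m ∧ cellAt land c.1 c.2 ≠ 0

def pvAdj (land : List (List Int)) (n m : Int) (c d : Int × Int) : Prop :=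
  pvNZ land n m c ∧ pvNZ land n m d ∧
    ((d.1 = c.1 + 1 ∧ d.2 = c.2) ∨ (d.1 = c.1 - 1 ∧ d.2 = c.2) ∨
     (d.1 = c.1 ∧ d.2 = c.2 + 1) ∨ (d.1 = c.1 ∧ d.2 = c.2 - 1))

def pvReach (land : List (List Int)) (n m : Int) : Int × Int → Int × Int → Prop :=
  Relation.ReflTransGen (pvAdj land n m)

def pvClosed (land : List (List Int)) (n m : Int) (V : List (Int × Int)) : Prop :=
  ∀ c ∈ V, ∀ d, pvAdj land n m c d → d ∈ V

theorem pvAdj_symm (land : List (List Int)) (n m : Int) (c d : Int × Int)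
    (h : pvAdj land n m c d) : pvAdj land n m d c := by
  obtain ⟨h1, h2, h3⟩ := h
  refine ⟨h2, h1, ?_⟩
  rcases h3 with ⟨a, b⟩ | ⟨a, b⟩ | ⟨a, b⟩ | ⟨a, b⟩ <;> omega

theorem pvReach_symm (land : List (List Int)) (n m : Int) (c d : Int × Int)
    (h : pvReach land n m c d) : pvReach land n m d c :=
  (Relation.ReflTransGen.symmetric (fun _ _ => pvAdj_symm land n m _ _)) h

theorem pvReach_NZ (land : List (List Int)) (n m : Int) (c d : Int × Int)
    (hc : pvNZ land n m c) (h : pvReach land n m c d) : pvNZ land n m d := by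
  induction h with
  | refl => exact hc
  | tail _ h2 _ => exact h2.2.1

theorem pvClosed_reach (land : List (List Int)) (n m : Int) (V : List (Int × Int))
    (hV : pvClosed land n m V) (c d : Int × Int) (hc : c ∈ V)
    (h : pvReach land n m c d) : d ∈ V := by
  induction h with
  | refl => exact hc
  | tail _ h2 ih => exact hV _ ih _ h2

theorem pvLen_le (land : List (List Int)) (n m : Int) (V : List (Int × Int))
    (hnd : V.Nodup) (hNZ : ∀ c ∈ V, pvNZ land n m c) :
    V.length ≤ n.toNat * m.toNat := by
  classical
  have hsub : V.toFinset ⊆ Finset.Icc 0 (n - 1) ×ˢ Finset.Icc 0 (m - 1) := by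
    intro c hc
    obtain ⟨cx, cy⟩ := c
    obtain ⟨h1, h2, h3, h4, _⟩ := hNZ _ (List.mem_toFinset.mp hc)
    simp only [Finset.mem_product, Finset.mem_Icc]
    constructor <;> constructor <;> omega
  have hcard := Finset.card_le_card hsub
  rw [List.toFinset_card_of_nodup hnd] at hcard
  have : (Finset.Icc (0:Int) (n - 1) ×ˢ Finset.Icc (0:Int) (m - 1)).card
      = n.toNat * m.toNat := by
    rw [Finset.card_product, Int.card_Icc, Int.card_Icc]
    congr 1 <;> omega
  omega

-- the four neighbour offsets, A's order
theorem pvOff_A (x y : Int) (c : Int × Int) :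
    (∃ d ∈ [((1:Int), (0:Int)), (0, -1), (-1, 0), (0, 1)], c = (x + d.1, y + d.2)) ↔
      ((c.1 = x + 1 ∧ c.2 = y) ∨ (c.1 = x - 1 ∧ c.2 = y) ∨
       (c.1 = x ∧ c.2 = y + 1) ∨ (c.1 = x ∧ c.2 = y - 1)) := by
  constructor
  · rintro ⟨d, hd, rfl⟩
    simp only [List.mem_cons, List.not_mem_nil, or_false] at hd
    rcases hd with rfl | rfl | rfl | rfl <;> simp <;> omega
  · intro h
    obtain ⟨cx, cy⟩ := c
    simp only [Prod.mk.injEq] at h ⊢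
    rcases h with ⟨h1, h2⟩ | ⟨h1, h2⟩ | ⟨h1, h2⟩ | ⟨h1, h2⟩
    · exact ⟨(1, 0), by simp, by omega⟩
    · exact ⟨(-1, 0), by simp, by omega⟩
    · exact ⟨(0, 1), by simp, by omega⟩
    · exact ⟨(0, -1), by simp, by omega⟩

theorem pvOff_B (x y : Int) (c : Int × Int) :
    (∃ d ∈ [((1:Int), (0:Int)), (-1, 0), (0, 1), (0, -1)], c = (x + d.1, y + d.2)) ↔
      ((c.1 = x + 1 ∧ c.2 = y) ∨ (c.1 = x - 1 ∧ c.2 = y) ∨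
       (c.1 = x ∧ c.2 = y + 1) ∨ (c.1 = x ∧ c.2 = y - 1)) := by
  constructor
  · rintro ⟨d, hd, rfl⟩
    simp only [List.mem_cons, List.not_mem_nil, or_false] at hd
    rcases hd with rfl | rfl | rfl | rfl <;> simp <;> omega
  · intro h
    obtain ⟨cx, cy⟩ := c
    simp only [Prod.mk.injEq] at h ⊢
    rcases h with ⟨h1, h2⟩ | ⟨h1, h2⟩ | ⟨h1, h2⟩ | ⟨h1, h2⟩
    · exact ⟨(1, 0), by simp, by omega⟩
    · exact ⟨(-1, 0), by simp, by omega⟩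
    · exact ⟨(0, 1), by simp, by omega⟩
    · exact ⟨(0, -1), by simp, by omega⟩

-- A's neighbour fold pushes exactly the fresh nonzero in-bounds neighbours
theorem foldl_dfsStep_spec (land : List (List Int)) (n m x y : Int) :
    ∀ (dirs : List (Int × Int)) (stack visited : List (Int × Int)),
      ∃ new : List (Int × Int),
        (dirs.foldl (dfsStep land n m x y) (stack, visited)).1 = new ++ stack ∧
        (dirs.foldl (dfsStep land n m x y) (stack, visited)).2 = new ++ visited ∧
        new.Nodup ∧
        (∀ c ∈ new, c ∉ visited ∧ pvNZ land n m c ∧ ∃ d ∈ dirs, c = (x + d.1, y + d.2)) ∧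
        (∀ d ∈ dirs, pvNZ land n m (x + d.1, y + d.2) →
          (x + d.1, y + d.2) ∈ (dirs.foldl (dfsStep land n m x y) (stack, visited)).2) := by
  intro dirs
  induction dirs with
  | nil =>
    intro stack visited
    exact ⟨[], by simp, by simp, List.nodup_nil, by simp, by simp⟩
  | cons d dirs ih =>
    intro stack visited
    rw [List.foldl_cons]
    by_cases hb : x + d.1 < 0 ∨ n ≤ x + d.1 ∨ y + d.2 < 0 ∨ m ≤ y + d.2
    · have hstep : dfsStep land n m x y (stack, visited) d = (stack, visited) := by
        simp only [dfsStep]; rw [if_pos hb]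
      rw [hstep]
      obtain ⟨new, e1, e2, hnd, hprop, hcov⟩ := ih stack visited
      refine ⟨new, e1, e2, hnd, ?_, ?_⟩
      · intro c hc
        obtain ⟨q1, q2, dd, hdd, q3⟩ := hprop c hc
        exact ⟨q1, q2, dd, List.mem_cons_of_mem _ hdd, q3⟩
      · intro dd hdd hq
        rcases List.mem_cons.mp hdd with rfl | hdd
        · exact absurd hb (by obtain ⟨z1, z2, z3, z4, _⟩ := hq; push Not; exact ⟨by omega, by omega, by omega, by omega⟩)
        · exact hcov dd hdd hq
    · by_cases hv : (x + d.1, y + d.2) ∈ visited ∨ cellAt land (x + d.1) (y + d.2) = 0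
      · have hstep : dfsStep land n m x y (stack, visited) d = (stack, visited) := by
          simp only [dfsStep]; rw [if_neg hb, if_pos hv]
        rw [hstep]
        obtain ⟨new, e1, e2, hnd, hprop, hcov⟩ := ih stack visited
        refine ⟨new, e1, e2, hnd, ?_, ?_⟩
        · intro c hc
          obtain ⟨q1, q2, dd, hdd, q3⟩ := hprop c hc
          exact ⟨q1, q2, dd, List.mem_cons_of_mem _ hdd, q3⟩
        · intro dd hdd hq
          rcases List.mem_cons.mp hdd with rfl | hdd
          · rcases hv with hv | hv
            · rw [e2]; exact List.mem_append_right _ hv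
            · exact absurd hv hq.2.2.2.2
          · exact hcov dd hdd hq
      · have hstep : dfsStep land n m x y (stack, visited) d
            = ((x + d.1, y + d.2) :: stack, (x + d.1, y + d.2) :: visited) := by
          simp only [dfsStep]; rw [if_neg hb, if_neg hv]
        rw [hstep]
        obtain ⟨new, e1, e2, hnd, hprop, hcov⟩ := ih ((x + d.1, y + d.2) :: stack)
          ((x + d.1, y + d.2) :: visited)
        push Not at hb hv
        have hNZc : pvNZ land n m (x + d.1, y + d.2) :=
          ⟨by simp; omega, by simp; omega, by simp; omega, by simp; omega, hv.2⟩
        refine ⟨new ++ [(x + d.1, y + d.2)], ?_, ?_, ?_, ?_, ?_⟩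
        · rw [e1, List.append_cons]
        · rw [e2, List.append_cons]
        · refine List.Nodup.append hnd (List.nodup_singleton _) ?_
          intro c hc hcs
          rw [List.mem_singleton] at hcs
          subst hcs
          exact (hprop _ hc).1 List.mem_cons_self
        · intro c hc
          rcases List.mem_append.mp hc with hc | hc
          · obtain ⟨q1, q2, dd, hdd, q3⟩ := hprop c hc
            exact ⟨fun hmem => q1 (List.mem_cons_of_mem _ hmem), q2,
              dd, List.mem_cons_of_mem _ hdd, q3⟩
          · rw [List.mem_singleton] at hc
            subst hc
            exact ⟨hv.1, hNZc, d, List.mem_cons_self, rfl⟩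
        · intro dd hdd hq
          rcases List.mem_cons.mp hdd with rfl | hdd
          · rw [e2]
            exact List.mem_append_right _ List.mem_cons_self
          · exact hcov dd hdd hq

def pvDfsPost (land : List (List Int)) (n m : Int)
    (stack visited : List (Int × Int)) (arr : List Int)
    (r : List Int × List (Int × Int)) : Prop :=
  (∀ c ∈ visited, c ∈ r.2) ∧
  r.2.Nodup ∧
  (∀ c ∈ r.2, c ∈ visited ∨ ∃ s ∈ stack, pvReach land n m s c) ∧
  (∀ c ∈ r.2, pvNZ land n m c) ∧
  (∀ c ∈ r.2, ∀ d, pvAdj land n m c d → d ∈ r.2) ∧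
  (r.1.length + visited.length = arr.length + stack.length + r.2.length) ∧
  (∀ y, y ∈ r.1 ↔ y ∈ arr ∨ (∃ x, (x, y) ∈ stack) ∨ (∃ x, (x, y) ∈ r.2 ∧ (x, y) ∉ visited))

theorem dfsLoop_nil (land : List (List Int)) (n m : Int) (fuel : Nat)
    (visited : List (Int × Int)) (arr : List Int) :
    dfsLoop land n m fuel [] visited arr = (arr, visited) := by
  cases fuel <;> rfl

theorem pvDfsPost_base (land : List (List Int)) (n m : Int)
    (visited : List (Int × Int)) (arr : List Int)
    (hndv : visited.Nodup)
    (hNZ : ∀ c ∈ visited, pvNZ land n m c)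
    (hI3 : ∀ c ∈ visited, c ∉ ([] : List (Int × Int)) → ∀ d, pvAdj land n m c d → d ∈ visited) :
    pvDfsPost land n m [] visited arr (arr, visited) := by
  refine ⟨fun c hc => hc, hndv, fun c hc => Or.inl hc, hNZ,
    fun c hc d hd => hI3 c hc (List.not_mem_nil) d hd, by simp, ?_⟩
  intro y
  constructor
  · exact Or.inl
  · rintro (h | ⟨x, hx⟩ | ⟨x, hx1, hx2⟩)
    · exact h
    · exact absurd hx List.not_mem_nil
    · exact absurd hx1 hx2

theorem dfsLoop_spec (land : List (List Int)) (n m : Int) :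
    ∀ (fuel : Nat) (stack visited : List (Int × Int)) (arr : List Int),
      visited.Nodup → stack.Nodup →
      (∀ c ∈ stack, c ∈ visited) →
      (∀ c ∈ visited, pvNZ land n m c) →
      (∀ c ∈ visited, c ∉ stack → ∀ d, pvAdj land n m c d → d ∈ visited) →
      stack.length + n.toNat * m.toNat + 1 ≤ fuel + visited.length →
      pvDfsPost land n m stack visited arr (dfsLoop land n m fuel stack visited arr) := by
  intro fuel
  induction fuel with
  | zero =>
    intro stack visited arr hndv hnds hsv hNZ hI3 hfuel
    cases stack with
    | nil => exact pvDfsPost_base land n m visited arr hndv hNZ hI3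
    | cons c rest =>
      exfalso
      have := pvLen_le land n m visited hndv hNZ
      simp only [List.length_cons] at hfuel
      omega
  | succ fuel ih =>
    intro stack visited arr hndv hnds hsv hNZ hI3 hfuel
    cases stack with
    | nil =>
      rw [dfsLoop_nil]
      exact pvDfsPost_base land n m visited arr hndv hNZ hI3
    | cons hd rest =>
      obtain ⟨x, y⟩ := hd
      simp only [dfsLoop]
      obtain ⟨new, e1, e2, hndn, hprop, hcov⟩ :=
        foldl_dfsStep_spec land n m x y
          [((1:Int), (0:Int)), (0, -1), (-1, 0), (0, 1)] rest visited
      rw [e1, e2] at *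
      have hxyv : (x, y) ∈ visited := hsv _ List.mem_cons_self
      have hxyNZ : pvNZ land n m (x, y) := hNZ _ hxyv
      have hrestnd : rest.Nodup := (List.nodup_cons.mp hnds).2
      have hdisj : ∀ c ∈ new, c ∉ visited := fun c hc => (hprop c hc).1
      have hadj_new : ∀ c ∈ new, pvAdj land n m (x, y) c := by
        intro c hc
        obtain ⟨_, hNZc, hoff⟩ := hprop c hc
        exact ⟨hxyNZ, hNZc, (pvOff_A x y c).mp hoff⟩
      have hcov' : ∀ dd, pvAdj land n m (x, y) dd → dd ∈ new ++ visited := by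
        intro dd hAdj
        obtain ⟨d, hd, rfl⟩ := (pvOff_A x y dd).mpr hAdj.2.2
        exact hcov d hd hAdj.2.1
      have POST := ih (new ++ rest) (new ++ visited) (arr ++ [y])
        (by
          refine List.Nodup.append hndn hndv ?_
          intro c hc hc2
          exact hdisj c hc hc2)
        (by
          refine List.Nodup.append hndn hrestnd ?_
          intro c hc hc2
          exact hdisj c hc (hsv _ (List.mem_cons_of_mem _ hc2)))
        (by
          intro c hc
          rcases List.mem_append.mp hc with hc | hc
          · exact List.mem_append_left _ hc
          · exact List.mem_append_right _ (hsv _ (List.mem_cons_of_mem _ hc)))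
        (by
          intro c hc
          rcases List.mem_append.mp hc with hc | hc
          · exact (hprop c hc).2.1
          · exact hNZ c hc)
        (by
          intro c hc hns d hAdj
          rcases List.mem_append.mp hc with hc | hc
          · exact absurd (List.mem_append_left _ hc) hns
          · by_cases hcq : c = (x, y)
            · subst hcq
              exact hcov' d hAdj
            · have : c ∉ (x, y) :: rest := by
                intro hmem
                rcases List.mem_cons.mp hmem with h | h
                · exact hcq h
                · exact hns (List.mem_append_right _ h)
              exact List.mem_append_right _ (hI3 c hc this d hAdj))
        (by
          simp only [List.length_append, List.length_cons] at hfuel ⊢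
          omega)
      obtain ⟨p1, p2, p3, p4, p5, p6, p7⟩ := POST
      have hnew_sub : ∀ c ∈ new, c ∈ (dfsLoop land n m fuel (new ++ rest) (new ++ visited) (arr ++ [y])).2 :=
        fun c hc => p1 c (List.mem_append_left _ hc)
      refine ⟨?_, p2, ?_, p4, p5, ?_, ?_⟩
      · intro c hc
        exact p1 c (List.mem_append_right _ hc)
      · intro c hc
        rcases p3 c hc with hc2 | ⟨s, hs, hr⟩
        · rcases List.mem_append.mp hc2 with hc2 | hc2
          · exact Or.inr ⟨(x, y), List.mem_cons_self,
              Relation.ReflTransGen.single (hadj_new _ hc2)⟩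
          · exact Or.inl hc2
        · rcases List.mem_append.mp hs with hs | hs
          · exact Or.inr ⟨(x, y), List.mem_cons_self,
              Relation.ReflTransGen.trans
                (Relation.ReflTransGen.single (hadj_new _ hs)) hr⟩
          · exact Or.inr ⟨s, List.mem_cons_of_mem _ hs, hr⟩
      · simp only [List.length_append, List.length_cons, List.length_nil] at p6 ⊢
        omega
      · intro y'
        rw [p7 y']
        constructor
        · rintro (ha | ⟨x', hx'⟩ | ⟨x', hx1, hx2⟩)
          · rcases List.mem_append.mp ha with ha | ha
            · exact Or.inl ha
            · rw [List.mem_singleton] at ha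
              subst ha
              exact Or.inr (Or.inl ⟨x, List.mem_cons_self⟩)
          · rcases List.mem_append.mp hx' with hx' | hx'
            · exact Or.inr (Or.inr ⟨x', hnew_sub _ hx', hdisj _ hx'⟩)
            · exact Or.inr (Or.inl ⟨x', List.mem_cons_of_mem _ hx'⟩)
          · exact Or.inr (Or.inr ⟨x', hx1, fun h => hx2 (List.mem_append_right _ h)⟩)
        · rintro (ha | ⟨x', hx'⟩ | ⟨x', hx1, hx2⟩)
          · exact Or.inl (List.mem_append_left _ ha)
          · rcases List.mem_cons.mp hx' with h | h
            · exact Or.inl (by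
                rw [Prod.mk.injEq] at h
                exact List.mem_append_right _ (by rw [List.mem_singleton, h.2]))
            · exact Or.inr (Or.inl ⟨x', List.mem_append_right _ h⟩)
          · by_cases hn : (x', y') ∈ new
            · exact Or.inr (Or.inl ⟨x', List.mem_append_left _ hn⟩)
            · refine Or.inr (Or.inr ⟨x', hx1, ?_⟩)
              intro h
              rcases List.mem_append.mp h with h | h
              · exact hn h
              · exact hx2 h

-- B's frontier comprehension contains exactly the nonzero in-bounds neighbours of frontier cells
theorem mem_frontierNbrs (land : List (List Int)) (n m : Int)
    (frontier : List (Int × Int)) (d : Int × Int) :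
    d ∈ frontierNbrs land n m frontier ↔
      ∃ c ∈ frontier, pvNZ land n m d ∧
        ((d.1 = c.1 + 1 ∧ d.2 = c.2) ∨ (d.1 = c.1 - 1 ∧ d.2 = c.2) ∨
         (d.1 = c.1 ∧ d.2 = c.2 + 1) ∨ (d.1 = c.1 ∧ d.2 = c.2 - 1)) := by
  simp only [frontierNbrs, List.mem_flatMap, List.mem_filterMap]
  constructor
  · rintro ⟨c, hc, dd, hdd, hsome⟩
    split at hsome
    · rename_i hcond
      injection hsome with h
      subst h
      refine ⟨c, hc, ⟨hcond.1, hcond.2.1, hcond.2.2.1, hcond.2.2.2.1, hcond.2.2.2.2⟩, ?_⟩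
      exact (pvOff_B c.1 c.2 _).mp ⟨dd, hdd, rfl⟩
    · exact absurd hsome (by simp)
  · rintro ⟨c, hc, hNZ, hoff⟩
    obtain ⟨dd, hdd, rfl⟩ := (pvOff_B c.1 c.2 d).mpr hoff
    refine ⟨c, hc, dd, hdd, ?_⟩
    rw [if_pos ⟨hNZ.1, hNZ.2.1, hNZ.2.2.1, hNZ.2.2.2.1, hNZ.2.2.2.2⟩]

def pvGrowPost (land : List (List Int)) (n m : Int)
    (comp frontier : List (Int × Int)) (r : List (Int × Int)) : Prop :=
  (∀ c ∈ comp, c ∈ r) ∧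
  r.Nodup ∧
  (∀ c ∈ r, c ∈ comp ∨ ∃ s ∈ frontier, pvReach land n m s c) ∧
  (∀ c ∈ r, ∀ d, pvAdj land n m c d → d ∈ r)

theorem growLoop_empty_frontier (land : List (List Int)) (n m : Int) (fuel : Nat)
    (comp : PySem.Set (Int × Int)) :
    growLoop land n m fuel comp [] = comp := by
  cases fuel <;> simp [growLoop]

theorem growLoop_spec (land : List (List Int)) (n m : Int) :
    ∀ (fuel : Nat) (comp frontier : List (Int × Int)),
      comp.Nodup →
      (∀ c ∈ frontier, c ∈ comp) →
      (∀ c ∈ comp, pvNZ land n m c) →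
      (∀ c ∈ comp, c ∉ frontier → ∀ d, pvAdj land n m c d → d ∈ comp) →
      n.toNat * m.toNat + 2 ≤ fuel + comp.length →
      pvGrowPost land n m comp frontier (growLoop land n m fuel comp frontier) := by
  intro fuel
  induction fuel with
  | zero =>
    intro comp frontier h1 h2 h3 h4 hfuel
    exfalso
    have := pvLen_le land n m comp h1 h3
    omega
  | succ fuel ih =>
    intro comp frontier h1 h2 h3 h4 hfuel
    simp only [growLoop]
    by_cases hf : frontier = []
    · rw [if_pos hf]
      subst hf
      exact ⟨fun c hc => hc, h1, fun c hc => Or.inl hc,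
        fun c hc d hd => h4 c hc List.not_mem_nil d hd⟩
    · rw [if_neg hf]
      have hf'nodup : (PySem.Set.diff (PySem.Set.ofList (frontierNbrs land n m frontier)) comp).Nodup :=
        PySem.Set.nodup_diff _ comp (PySem.Set.nodup_ofList _)
      have hf'mem : ∀ d, d ∈ PySem.Set.diff (PySem.Set.ofList (frontierNbrs land n m frontier)) comp ↔
          (d ∈ frontierNbrs land n m frontier ∧ d ∉ comp) := by
        intro d
        rw [PySem.Set.mem_diff, PySem.Set.mem_ofList]
      set f' := PySem.Set.diff (PySem.Set.ofList (frontierNbrs land n m frontier)) comp with hf'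
      have hdisj : ∀ x ∈ f', x ∉ comp := fun x hx => ((hf'mem x).mp hx).2
      have hupd : PySem.Set.update comp f' = comp ++ f' :=
        PySem.Set.update_eq_append_of_disjoint comp f' hf'nodup hdisj
      -- every f' cell is adjacent from a frontier cell
      have hadj_f' : ∀ c ∈ f', ∃ s ∈ frontier, pvAdj land n m s c := by
        intro c hc
        obtain ⟨c0, hc0, hNZ, hoff⟩ := (mem_frontierNbrs land n m frontier c).mp ((hf'mem c).mp hc).1
        exact ⟨c0, hc0, h3 c0 (h2 c0 hc0), hNZ, hoff⟩
      by_cases hfe : f' = []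
      · rw [hfe, growLoop_empty_frontier, PySem.Set.update_nil]
        refine ⟨fun c hc => hc, h1, fun c hc => Or.inl hc, ?_⟩
        intro c hc d hd
        by_cases hcf : c ∈ frontier
        · have hdmem : d ∈ frontierNbrs land n m frontier :=
            (mem_frontierNbrs land n m frontier d).mpr ⟨c, hcf, hd.2.1, hd.2.2⟩
          by_cases hdc : d ∈ comp
          · exact hdc
          · exact absurd ((hf'mem d).mpr ⟨hdmem, hdc⟩) (by rw [hfe]; exact List.not_mem_nil)
        · exact h4 c hc hcf d hd
      · rw [hupd]
        have POST := ih (comp ++ f') f'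
          (by
            rw [← hupd]
            exact PySem.Set.nodup_update _ _ h1)
          (fun c hc => List.mem_append_right _ hc)
          (by
            intro c hc
            rcases List.mem_append.mp hc with hc | hc
            · exact h3 c hc
            · obtain ⟨s, _, hA⟩ := hadj_f' c hc
              exact hA.2.1)
          (by
            intro c hc hcf d hd
            rcases List.mem_append.mp hc with hc | hc
            · by_cases hcfr : c ∈ frontier
              · have hdmem : d ∈ frontierNbrs land n m frontier :=
                  (mem_frontierNbrs land n m frontier d).mpr ⟨c, hcfr, hd.2.1, hd.2.2⟩
                by_cases hdc : d ∈ comp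
                · exact List.mem_append_left _ hdc
                · exact List.mem_append_right _ ((hf'mem d).mpr ⟨hdmem, hdc⟩)
              · exact List.mem_append_left _ (h4 c hc hcfr d hd)
            · exact absurd hc hcf)
          (by
            have hlen : 0 < f'.length := List.length_pos_iff.mpr hfe
            simp only [List.length_append]
            omega)
        obtain ⟨p1, p2, p3, p4⟩ := POST
        refine ⟨fun c hc => p1 c (List.mem_append_left _ hc), p2, ?_, p4⟩
        intro c hc
        rcases p3 c hc with hc2 | ⟨s, hs, hr⟩
        · rcases List.mem_append.mp hc2 with hc2 | hc2
          · exact Or.inl hc2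
          · obtain ⟨s, hs, hA⟩ := hadj_f' _ hc2
            exact Or.inr ⟨s, hs, Relation.ReflTransGen.single hA⟩
        · obtain ⟨s0, hs0, hA⟩ := hadj_f' _ hs
          exact Or.inr ⟨s0, hs0,
            Relation.ReflTransGen.trans (Relation.ReflTransGen.single hA) hr⟩

-- the bump fold, pointwise: nodup in-bounds column lists with equal membership give equal results
theorem bump_eval (ans : List Int) (y s : Int) (h0 : 0 ≤ y) (h1 : y < (ans.length : Int)) :
    bump ans y s = ans.set y.toNat (ans.getD y.toNat 0 + s) := by
  have hy : y = (y.toNat : Int) := (Int.toNat_of_nonneg h0).symm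
  have hn : y.toNat < ans.length := by omega
  rw [bump, hy, PySem.List.pyGetD_natCast, PySem.List.pySetD,
    PySem.List.pySet?_natCast _ _ _ hn, Option.getD_some, Int.toNat_natCast]

theorem bump_len (ans : List Int) (y s : Int) (h0 : 0 ≤ y) (h1 : y < (ans.length : Int)) :
    (bump ans y s).length = ans.length := by
  rw [bump_eval ans y s h0 h1, List.length_set]

theorem bump_getElem? (ans : List Int) (y s : Int) (k : Nat)
    (h0 : 0 ≤ y) (h1 : y < (ans.length : Int)) :
    (bump ans y s)[k]? = if (k : Int) = y then (ans[k]?).map (· + s) else ans[k]? := by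
  rw [bump_eval ans y s h0 h1]
  by_cases hk : (k : Int) = y
  · have hkn : k = y.toNat := by omega
    subst hkn
    have hlt : y.toNat < ans.length := by omega
    rw [if_pos hk, List.getElem?_set_self, List.getElem?_eq_getElem hlt,
      List.getD_eq_getElem _ _ hlt]
    · simp
    · exact hlt
  · have hkn : k ≠ y.toNat := by omega
    rw [if_neg hk, List.getElem?_set_ne (by omega)]

theorem bump_foldl_getElem? (s : Int) :
    ∀ (ys : List Int) (ans : List Int), ys.Nodup →
      (∀ y ∈ ys, 0 ≤ y ∧ y < (ans.length : Int)) →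
      (ys.foldl (fun a y => bump a y s) ans).length = ans.length ∧
      ∀ k : Nat, (ys.foldl (fun a y => bump a y s) ans)[k]? =
        (ans[k]?).map (fun v => if (k : Int) ∈ ys then v + s else v) := by
  intro ys
  induction ys with
  | nil =>
    intro ans _ _
    refine ⟨rfl, fun k => ?_⟩
    simp
  | cons y t ih =>
    intro ans hnd hb
    have hy := hb y List.mem_cons_self
    have hlen := bump_len ans y s hy.1 hy.2
    obtain ⟨ihl, ihc⟩ := ih (bump ans y s) (List.nodup_cons.mp hnd).2
      (fun z hz => by rw [hlen]; exact hb z (List.mem_cons_of_mem _ hz))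
    constructor
    · rw [List.foldl_cons, ihl, hlen]
    · intro k
      rw [List.foldl_cons, ihc k, bump_getElem? ans y s k hy.1 hy.2]
      have hyt : y ∉ t := (List.nodup_cons.mp hnd).1
      by_cases hk : (k : Int) = y
      · rw [if_pos hk]
        have hkt : (k : Int) ∉ t := hk ▸ hyt
        simp only [Option.map_map, hyt, hk, List.mem_cons, if_false]
        rfl
      · rw [if_neg hk]
        simp [List.mem_cons, hk]

theorem bump_foldl_congr (s : Int) (ys zs ans : List Int)
    (hy : ys.Nodup) (hz : zs.Nodup)
    (hyb : ∀ y ∈ ys, 0 ≤ y ∧ y < (ans.length : Int))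
    (hmem : ∀ y, y ∈ ys ↔ y ∈ zs) :
    ys.foldl (fun a y => bump a y s) ans = zs.foldl (fun a y => bump a y s) ans := by
  obtain ⟨hl1, hc1⟩ := bump_foldl_getElem? s ys ans hy hyb
  obtain ⟨hl2, hc2⟩ := bump_foldl_getElem? s zs ans hz (fun z hz2 => hyb z ((hmem z).mpr hz2))
  apply List.ext_getElem?
  intro k
  rw [hc1, hc2]
  simp only [hmem]

-- generic fold congruence under a state relation
theorem foldl_rel {α β γ : Type} (R : α → β → Prop) (P : γ → Prop)
    (fA : α → γ → α) (fB : β → γ → β)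
    (hstep : ∀ a b c, P c → R a b → R (fA a c) (fB b c)) :
    ∀ (l : List γ) (a : α) (b : β), (∀ c ∈ l, P c) → R a b →
      R (l.foldl fA a) (l.foldl fB b) := by
  intro l
  induction l with
  | nil => intro a b _ h; exact h
  | cons c t ih =>
    intro a b hP h
    exact ih _ _ (fun x hx => hP x (List.mem_cons_of_mem _ hx))
      (hstep a b c (hP c (List.mem_cons_self)) h)

-- the outer-loop state relation
def pvRel (land : List (List Int)) (n m : Int)
    (a : List (Int × Int) × List Int) (b : PySem.Set (Int × Int) × List Int) : Prop :=
  a.2 = b.2 ∧ a.2.length = m.toNat ∧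
  a.1.Nodup ∧ b.1.Nodup ∧
  (∀ c, c ∈ a.1 ↔ c ∈ b.1) ∧
  (∀ c ∈ a.1, pvNZ land n m c) ∧
  pvClosed land n m a.1

theorem outer_step (land : List (List Int)) (n m : Int) (hm : 0 ≤ m)
    (a : List (Int × Int) × List Int) (b : PySem.Set (Int × Int) × List Int)
    (ij : Int × Int) (hij : 0 ≤ ij.1 ∧ ij.1 < n ∧ 0 ≤ ij.2 ∧ ij.2 < m)
    (h : pvRel land n m a b) :
    pvRel land n m (solOuterA land n m a ij) (solOuterB land n m b ij) := by
  obtain ⟨hans, hlen, hndA, hndB, hmemAB, hNZA, hclA⟩ := h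
  by_cases hcond : ij ∉ a.1 ∧ cellAt land ij.1 ij.2 = 1
  case neg =>
    have hcondB : ¬ (cellAt land ij.1 ij.2 = 1 ∧ ij ∉ b.1) := by
      intro hc
      exact hcond ⟨fun hm2 => hc.2 ((hmemAB ij).mp hm2), hc.1⟩
    rw [solOuterA, solOuterB, if_neg hcond, if_neg hcondB]
    exact ⟨hans, hlen, hndA, hndB, hmemAB, hNZA, hclA⟩
  case pos =>
    have hcondB : cellAt land ij.1 ij.2 = 1 ∧ ij ∉ b.1 :=
      ⟨hcond.2, fun hm2 => hcond.1 ((hmemAB ij).mpr hm2)⟩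
    rw [solOuterA, solOuterB, if_pos hcond, if_pos hcondB]
    have hNZij : pvNZ land n m ij :=
      ⟨hij.1, hij.2.1, hij.2.2.1, hij.2.2.2, by rw [hcond.2]; exact one_ne_zero⟩
    set rA := dfsLoop land n m (n.toNat * m.toNat + 1) [ij] (ij :: a.1) [] with hrA
    set comp := growLoop land n m (n.toNat * m.toNat + 2) [ij] [ij] with hcompdef
    obtain ⟨p1, p2, p3, p4, p5, p6, p7⟩ :=
      dfsLoop_spec land n m (n.toNat * m.toNat + 1) [ij] (ij :: a.1) []
        (List.nodup_cons.mpr ⟨hcond.1, hndA⟩)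
        (List.nodup_singleton _)
        (by intro c hc; rw [List.mem_singleton] at hc; subst hc; exact List.mem_cons_self)
        (by
          intro c hc
          rcases List.mem_cons.mp hc with rfl | hc
          · exact hNZij
          · exact hNZA c hc)
        (by
          intro c hc hns d hd
          rcases List.mem_cons.mp hc with rfl | hc
          · exact (hns (List.mem_singleton.mpr rfl)).elim
          · exact List.mem_cons_of_mem _ (hclA c hc d hd))
        (by simp only [List.length_cons, List.length_nil]; omega)
    obtain ⟨q1, q2, q3, q4⟩ :=
      growLoop_spec land n m (n.toNat * m.toNat + 2) [ij] [ij]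
        (List.nodup_singleton _)
        (fun c hc => hc)
        (by intro c hc; rw [List.mem_singleton] at hc; subst hc; exact hNZij)
        (by intro c hc hcf; exact absurd hc hcf)
        (by simp only [List.length_cons, List.length_nil]; omega)
    have hcompmem : ∀ c, c ∈ comp ↔ pvReach land n m ij c := by
      intro c
      constructor
      · intro hc
        rcases q3 c hc with hc2 | ⟨s, hs, hr⟩
        · rw [List.mem_singleton] at hc2
          subst hc2
          exact Relation.ReflTransGen.refl
        · rw [List.mem_singleton] at hs
          subst hs
          exact hr
      · intro hr
        exact pvClosed_reach land n m comp q4 ij c (q1 ij List.mem_cons_self) hr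
    have hij_comp : ij ∈ comp := (hcompmem ij).mpr Relation.ReflTransGen.refl
    have hdisj : ∀ c ∈ comp, c ∉ a.1 := by
      intro c hc hca
      exact hcond.1 (pvClosed_reach land n m a.1 hclA c ij hca
        (pvReach_symm land n m ij c ((hcompmem c).mp hc)))
    have hA2mem : ∀ c, c ∈ rA.2 ↔ c ∈ a.1 ∨ c ∈ comp := by
      intro c
      constructor
      · intro hc
        rcases p3 c hc with hc2 | ⟨s, hs, hr⟩
        · rcases List.mem_cons.mp hc2 with rfl | hc2
          · exact Or.inr hij_comp
          · exact Or.inl hc2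
        · rw [List.mem_singleton] at hs
          subst hs
          exact Or.inr ((hcompmem c).mpr hr)
      · intro hc
        rcases hc with hc | hc
        · exact p1 c (List.mem_cons_of_mem _ hc)
        · exact pvClosed_reach land n m rA.2 p5 ij c (p1 ij List.mem_cons_self)
            ((hcompmem c).mp hc)
    have hperm : rA.2.Perm (a.1 ++ comp) := by
      refine (List.perm_ext_iff_of_nodup p2 ?_).mpr ?_
      · exact List.Nodup.append hndA q2 (fun c hc hc2 => hdisj c hc2 hc)
      · intro c
        rw [List.mem_append, hA2mem]
    have hlenA : rA.1.length = comp.length := by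
      have hl2 := hperm.length_eq
      rw [← hrA] at p6
      simp only [List.length_append, List.length_cons,
        List.length_nil] at p6 hl2
      omega
    have hcomp_pos : 0 < comp.length := List.length_pos_iff.mpr (fun he => by
      rw [he] at hij_comp; exact List.not_mem_nil hij_comp)
    have hsize_pos : ((rA.1.length : Int) > 0) := by
      rw [hlenA]; exact_mod_cast hcomp_pos
    rw [if_pos hsize_pos]
    have hNZcomp : ∀ c ∈ comp, pvNZ land n m c :=
      fun c hc => pvReach_NZ land n m ij c hNZij ((hcompmem c).mp hc)
    have hcolsA : ∀ y, y ∈ PySem.Set.ofList rA.1 ↔ ∃ c ∈ comp, c.2 = y := by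
      intro y
      rw [PySem.Set.mem_ofList, p7]
      constructor
      · rintro (h | ⟨x, hx⟩ | ⟨x, hx1, hx2⟩)
        · exact absurd h List.not_mem_nil
        · rw [List.mem_singleton] at hx
          exact ⟨ij, hij_comp, by rw [← hx]⟩
        · rcases (hA2mem _).mp hx1 with h | h
          · exact absurd (List.mem_cons_of_mem _ h) hx2
          · exact ⟨(x, y), h, rfl⟩
      · rintro ⟨c, hc, rfl⟩
        by_cases hcij : c = ij
        · subst hcij
          exact Or.inr (Or.inl ⟨c.1, by rw [Prod.mk.eta]; exact List.mem_cons_self⟩)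
        · refine Or.inr (Or.inr ⟨c.1, ?_, ?_⟩)
          · rw [Prod.mk.eta]
            exact (hA2mem c).mpr (Or.inr hc)
          · rw [Prod.mk.eta]
            intro hmm
            rcases List.mem_cons.mp hmm with h | h
            · exact hcij h
            · exact hdisj c hc h
    have hcolsB : ∀ y, y ∈ PySem.Set.ofList (comp.map (fun c => c.2)) ↔
        ∃ c ∈ comp, c.2 = y := by
      intro y
      rw [PySem.Set.mem_ofList, List.mem_map]
    have hboundsA : ∀ y ∈ PySem.Set.ofList rA.1, 0 ≤ y ∧ y < (a.2.length : Int) := by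
      intro y hy
      obtain ⟨c, hc, rfl⟩ := (hcolsA y).mp hy
      obtain ⟨_, _, h3, h4, _⟩ := hNZcomp c hc
      have : (a.2.length : Int) = m := by rw [hlen]; omega
      omega
    have hsz : ((rA.1.length : Int)) = ((comp.length : Int)) := by exact_mod_cast hlenA
    refine ⟨?_, ?_, p2, PySem.Set.nodup_update _ _ hndB, ?_, p4, p5⟩
    · rw [← hans, hsz]
      exact bump_foldl_congr (comp.length : Int) _ _ a.2
        (PySem.Set.nodup_ofList _) (PySem.Set.nodup_ofList _) hboundsA
        (fun y => (hcolsA y).trans (hcolsB y).symm)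
    · rw [(bump_foldl_getElem? ((rA.1.length : Int)) (PySem.Set.ofList rA.1) a.2
        (PySem.Set.nodup_ofList _) hboundsA).1, hlen]
    · intro c
      rw [PySem.Set.mem_update, hA2mem, hmemAB c]

theorem solution_agree (land : List (List Int)) : solution land = solution_alt land := by
  simp only [solution, solution_alt]
  set n : Int := (land.length : Int) with hn
  set m : Int := ((PySem.List.pyGetD land 0 []).length : Int) with hm'
  have hm : 0 ≤ m := by rw [hm']; exact_mod_cast Nat.zero_le _
  have hR := foldl_rel (pvRel land n m)
    (fun ij => 0 ≤ ij.1 ∧ ij.1 < n ∧ 0 ≤ ij.2 ∧ ij.2 < m)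
    (solOuterA land n m) (solOuterB land n m)
    (fun a b c hc hr => outer_step land n m hm a b c hc hr)
    (pvCells n m) ([], List.replicate m.toNat 0) ([], List.replicate m.toNat 0)
    (by
      intro c hc
      rw [pvCells, List.mem_flatMap] at hc
      obtain ⟨i, hi, hc⟩ := hc
      rw [List.mem_map] at hc
      obtain ⟨j, hj, rfl⟩ := hc
      rw [PySem.List.mem_pyRange_one] at hi hj
      exact ⟨hi.1, hi.2, hj.1, hj.2⟩)
    (⟨rfl, List.length_replicate, List.nodup_nil, List.nodup_nil,
      fun c => Iff.rfl, fun c hc => absurd hc List.not_mem_nil,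
      fun c hc => absurd hc List.not_mem_nil⟩)
  exact congrArg (fun l => (PySem.List.max? l (fun v => v)).getD 0) hR.1

-- ===== VERDICT (by name: the statement is the Claim_ definition above) =====
theorem solution_spec : Claim_equal_solution := by
  intro land _ _
  unfold Spec_solution
  exact solution_agree land
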